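-- pv_equiv track=rewrite | github.com/pssiva152/rocm-ci-dashboard | generate_rocm_html.py | _inf_rows_html
-- ===== SOURCE A (Python) =====
-- def _inf_bool(v) -> str:
--     if v:
--         return '<td class="bool-yes" style="vertical-align:middle;white-space:nowrap">Yes</td>'
--     return '<td class="bool-no" style="vertical-align:middle;white-space:nowrap">—</td>'
--
-- def _inf_rows_html(data: list, row_cls: str) -> str:
--     # Assign a stable alternating index to each distinct model_prefix (in order of first appearance)
--     _prefix_order: list = []
--     for rec in data:
--         if rec[2] not in _prefix_order:
--             _prefix_order.append(rec[2])
--     # Distinct subtle tint per model group (up to 10 groups)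
--     _group_palette = [
--         "#EDE7F6",  # pale violet
--         "#E3F2FD",  # pale blue
--         "#E8F5E9",  # pale green
--         "#FFF8E1",  # pale amber
--         "#FCE4EC",  # pale pink
--         "#E0F7FA",  # pale cyan
--         "#FBE9E7",  # pale deep-orange
--         "#F1F8E9",  # pale light-green
--         "#EEF2FF",  # pale indigo
--         "#FFF3E0",  # pale orange
--     ]
--     _prefix_bg = {p: _group_palette[i % len(_group_palette)] for i, p in enumerate(_prefix_order)}
--     rows = ""
--     for rec in data:
--         (name, model, model_prefix, runner, precision, framework,
--          multinode, docker_image) = rec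
--         bg = _prefix_bg[model_prefix]
--         rows += f"""<tr class="{row_cls}" style="background:{bg}">
--           <td style="vertical-align:middle">{name}</td>
--           <td style="font-size:12.5px;vertical-align:middle">{model}</td>
--           <td style="vertical-align:middle"><b>{model_prefix}</b></td>
--           <td style="vertical-align:middle"><span style="background:#EDE7F6;color:#4A148C;padding:2px 6px;border-radius:3px;font-size:12.5px">{runner}</span></td>
--           <td style="text-align:center;vertical-align:middle;white-space:nowrap">{precision}</td>
--           <td style="text-align:center;vertical-align:middle;white-space:nowrap">{framework}</td>
--           {_inf_bool(multinode)}
--           <td style="font-size:12.5px;color:#555;max-width:220px;overflow:hidden;text-overflow:ellipsis;white-space:nowrap;vertical-align:middle" title="{docker_image}">{docker_image if docker_image else "—"}</td>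
--         </tr>\n"""
--     return rows
-- ===== SOURCE B (Python) =====
-- # B: stateless formulation — each row's color is a pure function of the whole list:
-- # color index of prefix p = number of distinct prefixes strictly before p's first
-- # occurrence. No running order list or dict; rows produced by a map and joined.
--
-- _GROUP_PALETTE = [
--     "#EDE7F6", "#E3F2FD", "#E8F5E9", "#FFF8E1", "#FCE4EC",
--     "#E0F7FA", "#FBE9E7", "#F1F8E9", "#EEF2FF", "#FFF3E0",
-- ]
--
-- def _inf_bool(v) -> str:
--     if v:
--         return '<td class="bool-yes" style="vertical-align:middle;white-space:nowrap">Yes</td>'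
--     return '<td class="bool-no" style="vertical-align:middle;white-space:nowrap">—</td>'
--
-- def _inf_rows_html(data: list, row_cls: str) -> str:
--     prefixes = [rec[2] for rec in data]
--
--     def _bg(p: str) -> str:
--         j = prefixes.index(p)
--         return _GROUP_PALETTE[len(set(prefixes[:j])) % len(_GROUP_PALETTE)]
--
--     def _row(rec) -> str:
--         (name, model, model_prefix, runner, precision, framework,
--          multinode, docker_image) = rec
--         bg = _bg(model_prefix)
--         return f"""<tr class="{row_cls}" style="background:{bg}">
--           <td style="vertical-align:middle">{name}</td>
--           <td style="font-size:12.5px;vertical-align:middle">{model}</td>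
--           <td style="vertical-align:middle"><b>{model_prefix}</b></td>
--           <td style="vertical-align:middle"><span style="background:#EDE7F6;color:#4A148C;padding:2px 6px;border-radius:3px;font-size:12.5px">{runner}</span></td>
--           <td style="text-align:center;vertical-align:middle;white-space:nowrap">{precision}</td>
--           <td style="text-align:center;vertical-align:middle;white-space:nowrap">{framework}</td>
--           {_inf_bool(multinode)}
--           <td style="font-size:12.5px;color:#555;max-width:220px;overflow:hidden;text-overflow:ellipsis;white-space:nowrap;vertical-align:middle" title="{docker_image}">{docker_image if docker_image else "—"}</td>
--         </tr>\n"""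
--
--     return "".join(map(_row, data))
-- ===== Notes on version B (the rewrite author's own statement) =====
-- stated objective: alternative
-- what changed: Replaces A's stateful two-pass scheme (building a first-appearance order list, then a prefix->color dict used while concatenating rows) with a stateless per-row closed form: each row's color index is recomputed independently as the number of distinct prefixes before that prefix's first occurrence, and the rows are produced by map + join; this trades A's linear emission for quadratic recomputation in exchange for eliminating all shared mutable state.
import Mathlib
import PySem

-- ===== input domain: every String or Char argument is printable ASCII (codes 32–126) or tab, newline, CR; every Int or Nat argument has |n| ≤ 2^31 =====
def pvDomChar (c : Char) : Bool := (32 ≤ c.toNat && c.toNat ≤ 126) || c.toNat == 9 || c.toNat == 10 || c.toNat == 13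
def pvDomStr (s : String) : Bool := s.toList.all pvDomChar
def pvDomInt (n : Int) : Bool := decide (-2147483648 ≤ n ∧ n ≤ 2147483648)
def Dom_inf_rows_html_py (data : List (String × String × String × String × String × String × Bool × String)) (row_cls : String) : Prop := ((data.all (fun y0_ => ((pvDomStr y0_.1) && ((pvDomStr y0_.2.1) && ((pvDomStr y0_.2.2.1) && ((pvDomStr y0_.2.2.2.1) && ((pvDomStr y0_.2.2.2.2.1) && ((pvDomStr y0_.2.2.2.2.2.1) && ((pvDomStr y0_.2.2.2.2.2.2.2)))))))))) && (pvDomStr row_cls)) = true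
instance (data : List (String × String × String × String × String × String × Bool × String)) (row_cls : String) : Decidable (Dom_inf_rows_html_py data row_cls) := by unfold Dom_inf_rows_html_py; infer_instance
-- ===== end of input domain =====

-- B replaces A's stateful two-pass scheme (first-appearance order list + prefix->color dict
-- used while concatenating) with a stateless per-row closed form (distinct prefixes before the
-- prefix's first occurrence), map + join; same return value (objective: alternative).

-- ===== PORT A =====
-- shared HTML fragments (identical f-string template in both Pythons)
def infBool (v : Bool) : String :=
  if v then "<td class=\"bool-yes\" style=\"vertical-align:middle;white-space:nowrap\">Yes</td>"
  else "<td class=\"bool-no\" style=\"vertical-align:middle;white-space:nowrap\">—</td>"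

def infPalette : List String :=
  ["#EDE7F6", "#E3F2FD", "#E8F5E9", "#FFF8E1", "#FCE4EC",
   "#E0F7FA", "#FBE9E7", "#F1F8E9", "#EEF2FF", "#FFF3E0"]

-- _group_palette[i % len(_group_palette)]  (i ≥ 0, so the lookup never fails; "" is unreachable)
def colorAt (i : Int) : String :=
  (PySem.List.pyGet? infPalette (PySem.Int.mod i (infPalette.length : Int))).getD ""

-- the row f-string, byte for byte
def infRow (row_cls bg name model model_prefix runner precision framework : String)
    (multinode : Bool) (docker : String) : String :=
  "<tr class=\"" ++ row_cls ++ "\" style=\"background:" ++ bg ++ "\">\n          <td style=\"vertical-align:middle\">" ++ name ++ "</td>\n          <td style=\"font-size:12.5px;vertical-align:middle\">" ++ model ++ "</td>\n          <td style=\"vertical-align:middle\"><b>" ++ model_prefix ++ "</b></td>\n          <td style=\"vertical-align:middle\"><span style=\"background:#EDE7F6;color:#4A148C;padding:2px 6px;border-radius:3px;font-size:12.5px\">" ++ runner ++ "</span></td>\n          <td style=\"text-align:center;vertical-align:middle;white-space:nowrap\">" ++ precision ++ "</td>\n          <td style=\"text-align:center;vertical-align:middle;white-space:nowrap\">" ++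 framework ++ "</td>\n          " ++ infBool multinode ++ "\n          <td style=\"font-size:12.5px;color:#555;max-width:220px;overflow:hidden;text-overflow:ellipsis;white-space:nowrap;vertical-align:middle\" title=\"" ++ docker ++ "\">" ++ (if docker == "" then "—" else docker) ++ "</td>\n        </tr>\n"

-- A, loop 1: _prefix_order (first appearances of rec[2])
def buildOrder (acc : List String)
    (data : List (String × String × String × String × String × String × Bool × String)) : List String :=
  data.foldl (fun acc rec => if acc.contains rec.2.2.1 then acc else acc ++ [rec.2.2.1]) acc

-- A, dict comprehension: {p: palette[i % 10] for i, p in enumerate(order)}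
def mkDict (d : PySem.Dict String String) (ips : List (Int × String)) : PySem.Dict String String :=
  ips.foldl (fun d ip => d.insert ip.2 (colorAt ip.1)) d

-- A, loop 2: emission with string concatenation
def emitA (row_cls : String) (bgd : PySem.Dict String String) (rows : String)
    (data : List (String × String × String × String × String × String × Bool × String)) : String :=
  data.foldl (fun rows rec =>
    rows ++ infRow row_cls ((bgd.get? rec.2.2.1).getD "") rec.1 rec.2.1 rec.2.2.1
      rec.2.2.2.1 rec.2.2.2.2.1 rec.2.2.2.2.2.1 rec.2.2.2.2.2.2.1 rec.2.2.2.2.2.2.2) rows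

def inf_rows_html_py (data : List (String × String × String × String × String × String × Bool × String)) (row_cls : String) : String :=
  emitA row_cls (mkDict PySem.Dict.empty (PySem.List.enumerate (buildOrder [] data))) "" data

-- ===== PORT B =====
-- B: _bg(p) = palette[len(set(prefixes[:prefixes.index(p)])) % 10] — stateless closed form
-- (p is always in prefixes, so .index never raises; getD 0 is unreachable)
def bgB (ps : List String) (p : String) : String :=
  let j : Nat := (PySem.List.index? ps p).getD 0
  colorAt ((PySem.Set.ofList (PySem.List.slice ps none (some (j : Int)))).length : Int)

-- B: one row (same f-string)
def rowB (row_cls : String) (ps : List String)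
    (rec : String × String × String × String × String × String × Bool × String) : String :=
  infRow row_cls (bgB ps rec.2.2.1) rec.1 rec.2.1 rec.2.2.1
    rec.2.2.2.1 rec.2.2.2.2.1 rec.2.2.2.2.2.1 rec.2.2.2.2.2.2.1 rec.2.2.2.2.2.2.2

def inf_rows_html_py_alt (data : List (String × String × String × String × String × String × Bool × String)) (row_cls : String) : String :=
  let ps := data.map (fun rec => rec.2.2.1)
  String.join (data.map (rowB row_cls ps))

-- ===== PRECONDITION & SPEC =====
def Spec_inf_rows_html_py (data : List (String × String × String × String × String × String × Bool × String)) (row_cls : String) (out : String) : Prop := out = inf_rows_html_py_alt data row_cls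
instance (data : List (String × String × String × String × String × String × Bool × String)) (row_cls : String) (out : String) : Decidable (Spec_inf_rows_html_py data row_cls out) := by unfold Spec_inf_rows_html_py; infer_instance

-- ===== CLAIM (what is proved, stated in full; the proofs are below) =====
def Claim_equal_inf_rows_html_py : Prop := ∀ (data : List (String × String × String × String × String × String × Bool × String)) (row_cls : String), Dom_inf_rows_html_py data row_cls → Spec_inf_rows_html_py data row_cls (inf_rows_html_py data row_cls)

-- ===== LEMMAS AND PROOFS =====
theorem foldl_append_str (l : List String) : ∀ a : String, l.foldl (· ++ ·) a = a ++ l.foldl (· ++ ·) "" := by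
  induction l with
  | nil => intro a; simp
  | cons b t ih => intro a; simp only [List.foldl_cons]; rw [ih (a ++ b), ih ("" ++ b)]; simp [String.append_assoc]

theorem join_cons (a : String) (l : List String) : String.join (a :: l) = a ++ String.join l := by
  simp only [String.join, List.foldl_cons]; rw [foldl_append_str l ("" ++ a)]; simp

-- A's emission loop is the join of the per-record rows
theorem emitA_eq_join (row_cls : String) (d : PySem.Dict String String)
    (data : List (String × String × String × String × String × String × Bool × String)) :
    ∀ s, emitA row_cls d s data = s ++ String.join (data.map (fun rec =>
      infRow row_cls ((d.get? rec.2.2.1).getD "") rec.1 rec.2.1 rec.2.2.1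
        rec.2.2.2.1 rec.2.2.2.2.1 rec.2.2.2.2.2.1 rec.2.2.2.2.2.2.1 rec.2.2.2.2.2.2.2)) := by
  induction data with
  | nil => intro s; simp [emitA, String.join]
  | cons r rest ih =>
    intro s
    show emitA row_cls d (s ++ _) rest = _
    rw [ih, List.map_cons, join_cons, String.append_assoc]

-- A's loop 1 is exactly set(...)-style first-occurrence folding over the prefixes
theorem buildOrder_eq (acc : List String)
    (data : List (String × String × String × String × String × String × Bool × String)) :
    buildOrder acc data = (data.map (fun rec => rec.2.2.1)).foldl PySem.Set.add acc := by
  rw [List.foldl_map]; rfl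

-- dict-comprehension lookup (from the previous A-side analysis)
theorem get?_mkDict (ord : List String) : ∀ (s : Int) (d : PySem.Dict String String),
    ord.Nodup → ∀ p,
    (mkDict d (PySem.List.enumerate ord s)).get? p
      = if p ∈ ord then some (colorAt (s + (ord.idxOf p : Int))) else d.get? p := by
  induction ord with
  | nil => intro s d _ p; simp [mkDict, PySem.List.enumerate_nil]
  | cons x xs ih =>
    intro s d hnd p
    rw [PySem.List.enumerate_cons]
    have hx : x ∉ xs := (List.nodup_cons.mp hnd).1
    have hxs := (List.nodup_cons.mp hnd).2
    have hstep : mkDict d ((s, x) :: PySem.List.enumerate xs (s + 1))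
        = mkDict (d.insert x (colorAt s)) (PySem.List.enumerate xs (s + 1)) := rfl
    rw [hstep, ih (s + 1) _ hxs p]
    by_cases hpx : p = x
    · subst hpx
      simp [hx, PySem.Dict.get?_insert_self]
    · by_cases hpm : p ∈ xs
      · have hidx : (x :: xs).idxOf p = xs.idxOf p + 1 := List.idxOf_cons_ne xs (fun e => hpx e.symm)
        simp only [hpm, if_true, List.mem_cons, hpx, false_or, hidx]
        congr 2
        push_cast
        ring
      · simp [hpm, hpx, PySem.Dict.get?_insert]

theorem take_idxOf_decomp (p : String) : ∀ ps : List String, p ∈ ps →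
    ps = ps.take (ps.idxOf p) ++ p :: ps.drop (ps.idxOf p + 1) ∧ p ∉ ps.take (ps.idxOf p) := by
  intro ps
  induction ps with
  | nil => simp
  | cons x t ih =>
    intro h
    by_cases hx : x = p
    · subst hx; simp
    · have hpt : p ∈ t := by cases h with | head => exact absurd rfl hx | tail _ h => exact h
      obtain ⟨h1, h2⟩ := ih hpt
      have hidx : (x :: t).idxOf p = t.idxOf p + 1 := List.idxOf_cons_ne t hx
      rw [hidx]
      refine ⟨by simpa using h1, ?_⟩
      simp only [List.take_succ_cons, List.mem_cons, not_or]
      exact ⟨Ne.symm hx, h2⟩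

-- first-occurrence folding only appends to its accumulator
theorem ofList_foldl (l : List String) (acc : List String) :
    ∃ t, l.foldl PySem.Set.add acc = acc ++ t := by
  induction l generalizing acc with
  | nil => exact ⟨[], by simp⟩
  | cons x r ih =>
    simp only [List.foldl_cons]
    by_cases hm : x ∈ acc
    · rw [show PySem.Set.add acc x = acc from by simp [PySem.Set.add, List.contains_eq_mem, hm]]
      exact ih acc
    · obtain ⟨t, ht⟩ := ih (PySem.Set.add acc x)
      refine ⟨[x] ++ t, ?_⟩
      rw [ht, show PySem.Set.add acc x = acc ++ [x] from by simp [PySem.Set.add, List.contains_eq_mem, hm]]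
      simp

theorem idxOf_middle (p : String) : ∀ (l1 : List String), p ∉ l1 → ∀ l2, (l1 ++ p :: l2).idxOf p = l1.length := by
  intro l1
  induction l1 with
  | nil => simp
  | cons x t ih =>
    intro h l2
    have hx : ¬ x = p := fun e => h (e ▸ List.mem_cons_self)
    have h2 := List.idxOf_cons_ne (t ++ p :: l2) hx
    simp only [List.cons_append] at *
    rw [h2, ih (fun m => h (List.mem_cons_of_mem _ m)) l2, List.length_cons]

-- KEY: first-appearance index of p = number of distinct prefixes before p's first occurrence
theorem ofList_idxOf_eq (ps : List String) (p : String) (h : p ∈ ps) :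
    (PySem.Set.ofList ps).idxOf p = (PySem.Set.ofList (ps.take (ps.idxOf p))).length := by
  obtain ⟨hdec, hnm⟩ := take_idxOf_decomp p ps h
  set l1 := ps.take (ps.idxOf p)
  set l2 := ps.drop (ps.idxOf p + 1)
  have hsplit : PySem.Set.ofList ps = l2.foldl PySem.Set.add (PySem.Set.add (PySem.Set.ofList l1) p) := by
    conv_lhs => rw [hdec]
    simp [PySem.Set.ofList_eq_foldl, List.foldl_append]
  rw [hsplit]
  have hp1 : p ∉ PySem.Set.ofList l1 := fun m => hnm ((PySem.Set.mem_ofList _ _).1 m)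
  have hadd : PySem.Set.add (PySem.Set.ofList l1) p = PySem.Set.ofList l1 ++ [p] := by
    simp [PySem.Set.add, List.contains_eq_mem, hp1]
  obtain ⟨t, ht⟩ := ofList_foldl l2 (PySem.Set.add (PySem.Set.ofList l1) p)
  rw [ht, hadd, List.append_assoc]
  exact idxOf_middle p _ hp1 _

theorem idxOf?_of_mem (p : String) : ∀ ps : List String, p ∈ ps → List.idxOf? p ps = some (ps.idxOf p) := by
  intro ps
  induction ps with
  | nil => simp
  | cons x t ih =>
    intro h
    by_cases hx : x = p
    · subst hx; simp [List.idxOf?_cons]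
    · have hpt : p ∈ t := by cases h with | head => exact absurd rfl hx | tail _ h => exact h
      simp [List.idxOf?_cons, hx, ih hpt]

-- the two per-record colors agree
theorem bg_agree (data : List (String × String × String × String × String × String × Bool × String))
    (p : String) (hp : p ∈ data.map (fun rec => rec.2.2.1)) :
    ((mkDict PySem.Dict.empty (PySem.List.enumerate (buildOrder [] data))).get? p).getD ""
      = bgB (data.map (fun rec => rec.2.2.1)) p := by
  set ps := data.map (fun rec => rec.2.2.1) with hps
  have hord : buildOrder [] data = PySem.Set.ofList ps := by
    rw [buildOrder_eq, PySem.Set.ofList_eq_foldl]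
  have hnd : (PySem.Set.ofList ps).Nodup := PySem.Set.nodup_ofList ps
  have hmem : p ∈ PySem.Set.ofList ps := (PySem.Set.mem_ofList _ _).2 hp
  rw [hord, get?_mkDict _ 0 _ hnd p, if_pos hmem]
  rw [bgB]
  have hj : (PySem.List.index? ps p).getD 0 = ps.idxOf p := by
    rw [PySem.List.index?_eq_idxOf?, idxOf?_of_mem p ps hp]; rfl
  rw [hj, PySem.List.slice_to_natCast]
  simp only [Option.getD_some, Int.zero_add]
  rw [ofList_idxOf_eq ps p hp]


-- ===== VERDICT (by name: the statement is the Claim_ definition above) =====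
theorem main_eq (data : List (String × String × String × String × String × String × Bool × String))
    (row_cls : String) : inf_rows_html_py data row_cls = inf_rows_html_py_alt data row_cls := by
  have hmap : data.map (fun rec =>
      infRow row_cls (((mkDict PySem.Dict.empty (PySem.List.enumerate (buildOrder [] data))).get? rec.2.2.1).getD "")
        rec.1 rec.2.1 rec.2.2.1 rec.2.2.2.1 rec.2.2.2.2.1 rec.2.2.2.2.2.1 rec.2.2.2.2.2.2.1 rec.2.2.2.2.2.2.2)
      = data.map (rowB row_cls (data.map (fun rec => rec.2.2.1))) := by
    apply List.map_congr_left
    intro rec hrec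
    rw [rowB, bg_agree data rec.2.2.1 (List.mem_map_of_mem hrec)]
  show emitA row_cls (mkDict PySem.Dict.empty (PySem.List.enumerate (buildOrder [] data))) "" data
      = String.join (data.map (rowB row_cls (data.map (fun rec => rec.2.2.1))))
  rw [emitA_eq_join, ← hmap]
  simp

theorem inf_rows_html_py_spec : Claim_equal_inf_rows_html_py := by
  intro data row_cls _
  exact main_eq data row_cls
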